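-- pv_equiv track=rewrite | github.com/jalddak/ps_training | python/programmers/graph/순위.py | solution
-- ===== SOURCE A (Python) =====
-- def solution(n, results):
--     answer = 0
--     dic = {}
--     for r in results:
--         if r[0] not in dic:
--             dic[r[0]] = [[r[1]], []]
--         else:
--             dic[r[0]][0].append(r[1])
--         if r[1] not in dic:
--             dic[r[1]] = [[], [r[0]]]
--         else:
--             dic[r[1]][1].append(r[0])
--
--     for key in dic:
--         queue = dic[key][0][:]
--         while len(queue) != 0:
--             search = queue.pop()
--             for num in dic[search][0]:
--                 if num not in dic[key][0]:
--                     dic[key][0].append(num)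
--                     queue.append(num)
--
--     for key in dic:
--         queue = dic[key][1][:]
--         while len(queue) != 0:
--             search = queue.pop()
--             for num in dic[search][1]:
--                 if num not in dic[key][1]:
--                     dic[key][1].append(num)
--                     queue.append(num)
--
--     for key in dic:
--         if len(dic[key][0] + dic[key][1]) == n-1:
--             answer += 1
--     return answer
-- ===== SOURCE B (Python) =====
-- def solution(n, results):
--     edges = {(r[0], r[1]) for r in results}
--     closure = set(edges)
--     while True:
--         new = {(a, d) for (a, b) in closure for (c, d) in edges if b == c}
--         new -= closure
--         if not new:
--             break
--         closure |= new
--     players = {p for e in edges for p in e}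
--     return sum(1 for k in players
--                if sum(1 for e in closure if e[0] == k)
--                 + sum(1 for e in closure if e[1] == k) == n - 1)
-- ===== Notes on version B (the rewrite author's own statement) =====
-- stated objective: alternative
-- what changed: Replaced A's per-player worklist traversal of a mutated win/lose adjacency dict by a global transitive closure of the result-pair SET computed by iterating a relational join to a fixpoint, then counting each player's wins/losses by scanning the closed pair set.
-- outside the precondition, e.g. on solution(3, [[1, 2], [1, 2]]): A returns 2, B returns 0
import Mathlib
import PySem

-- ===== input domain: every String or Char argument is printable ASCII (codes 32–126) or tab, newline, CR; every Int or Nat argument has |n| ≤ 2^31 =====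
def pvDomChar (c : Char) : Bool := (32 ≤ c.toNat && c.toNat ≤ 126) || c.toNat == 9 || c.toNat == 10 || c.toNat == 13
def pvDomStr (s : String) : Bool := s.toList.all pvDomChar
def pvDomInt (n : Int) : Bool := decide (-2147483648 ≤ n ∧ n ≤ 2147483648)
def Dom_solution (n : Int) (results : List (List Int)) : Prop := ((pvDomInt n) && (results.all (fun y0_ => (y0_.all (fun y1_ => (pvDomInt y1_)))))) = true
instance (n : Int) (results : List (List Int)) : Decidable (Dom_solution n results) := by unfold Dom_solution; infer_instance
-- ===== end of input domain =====

-- B replaces A's per-player worklist traversal of a mutated adjacency dict by a global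
-- transitive closure of the result-pair set, computed by iterating a relational join to a
-- fixpoint, then counting wins/losses by scanning the closed pair set (objective: alternative).


-- ===== PORT A =====
-- helpers for the two symmetric closure loops of A: select / update component 0 (wins) or 1 (losses)
def pvSel (side : Bool) (p : List Int × List Int) : List Int := if side then p.2 else p.1

def pvUpd (side : Bool) (f : List Int → List Int) (p : List Int × List Int) : List Int × List Int :=
  if side then (p.1, f p.2) else (f p.1, p.2)

-- body of A's first loop: record one result row in dic = {player: [wins list, losses list]}
def pvRowA (dic : PySem.Dict Int (List Int × List Int)) (r : List Int) :
    PySem.Dict Int (List Int × List Int) :=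
  let a := PySem.List.pyGetD r 0 0   -- r[0]; exact, Pre_ guarantees 2 ≤ len(r)
  let b := PySem.List.pyGetD r 1 0   -- r[1]
  let dic := if dic.contains a then dic.modify a ([], []) (pvUpd false (fun l => l ++ [b]))
             else dic.insert a ([b], [])
  if dic.contains b then dic.modify b ([], []) (pvUpd true (fun l => l ++ [a]))
  else dic.insert b ([], [a])

def pvBuildA (results : List (List Int)) : PySem.Dict Int (List Int × List Int) :=
  results.foldl pvRowA PySem.Dict.empty

-- inner 'for num in dic[search][side]' loop: append unseen nums to dic[key][side] and to the queue
def pvInnerA (side : Bool) (key : Int)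
    (st : PySem.Dict Int (List Int × List Int) × List Int) (nums : List Int) :
    PySem.Dict Int (List Int × List Int) × List Int :=
  nums.foldl (fun st num =>
    if (pvSel side (st.1.getD key ([], []))).contains num then st
    else (st.1.modify key ([], []) (pvUpd side (fun l => l ++ [num])), num :: st.2)) st

-- 'while len(queue) != 0' loop; the queue is kept REVERSED (head = Python's last element, so
-- 'queue.pop()' is taking the head and 'queue.append' is cons).  Fuel: under Pre_ the loop pops at
-- most |queue| + |keys| times (each push appends a NEW element of the key set to dic[key][side]),
-- so dic.size + |queue| + 1 steps always suffice; dic[search] always exists under Pre_ (getD exact).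
def pvWhileA (side : Bool) (key : Int) :
    Nat → PySem.Dict Int (List Int × List Int) → List Int → PySem.Dict Int (List Int × List Int)
  | 0, dic, _ => dic
  | _ + 1, dic, [] => dic
  | fuel + 1, dic, search :: rest =>
      let st := pvInnerA side key (dic, rest) (pvSel side (dic.getD search ([], [])))
      pvWhileA side key fuel st.1 st.2

-- 'for key in dic:' closure loop (A runs it once per side)
def pvCloseA (side : Bool) (dic : PySem.Dict Int (List Int × List Int)) :
    PySem.Dict Int (List Int × List Int) :=
  dic.keys.foldl (fun dic key =>
    let q := (pvSel side (dic.getD key ([], []))).reverse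
    pvWhileA side key (dic.size + q.length + 1) dic q) dic

def solution (n : Int) (results : List (List Int)) : Int :=
  let dic := pvBuildA results
  let dic := pvCloseA false dic
  let dic := pvCloseA true dic
  dic.keys.foldl (fun answer key =>
    let p := dic.getD key ([], [])
    if ((p.1 ++ p.2).length : Int) = n - 1 then answer + 1 else answer) 0

-- ===== PORT B =====
-- edges = {(r[0], r[1]) for r in results}   (r[0]/r[1] exact under Pre_: 2 ≤ len(r))
def pvEdgesB (results : List (List Int)) : PySem.Set (Int × Int) :=
  PySem.Set.ofList (results.map (fun r => (PySem.List.pyGetD r 0 0, PySem.List.pyGetD r 1 0)))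

-- new = {(a, d) for (a, b) in closure for (c, d) in edges if b == c} - closure
def pvNewB (edges c : PySem.Set (Int × Int)) : PySem.Set (Int × Int) :=
  PySem.Set.diff
    (PySem.Set.ofList (c.flatMap (fun p =>
      (edges.filter (fun q => q.1 == p.2)).map (fun q => (p.1, q.2))))) c

-- 'while True:' join-to-fixpoint loop; fuel: each non-final round adds at least one new pair of
-- players and the closure holds at most (2·|edges|)² pairs, so 4·|edges|² + 1 rounds suffice
def pvCloseLoopB (edges : PySem.Set (Int × Int)) :
    Nat → PySem.Set (Int × Int) → PySem.Set (Int × Int)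
  | 0, c => c
  | fuel + 1, c =>
      let nw := pvNewB edges c
      if nw.isEmpty then c else pvCloseLoopB edges fuel (PySem.Set.union c nw)

def solution_alt (n : Int) (results : List (List Int)) : Int :=
  let edges := pvEdgesB results
  let closure := pvCloseLoopB edges (4 * edges.length * edges.length + 1) edges
  let players := PySem.Set.ofList (edges.flatMap (fun e => [e.1, e.2]))
  players.foldl (fun acc k =>
    if ((closure.filter (fun e => e.1 == k)).length : Int)
       + ((closure.filter (fun e => e.2 == k)).length : Int) = n - 1
    then acc + 1 else acc) 0

-- ===== PRECONDITION & SPEC =====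
def pvPairs (results : List (List Int)) : List (Int × Int) :=
  results.map (fun r => (PySem.List.pyGetD r 0 0, PySem.List.pyGetD r 1 0))

-- Pre_ excludes rows with fewer than 2 entries (A raises IndexError on r[1]) and duplicate
-- (r[0], r[1]) pairs, a defensible corner where A's duplicated-list length is accidental.
def Pre_solution (n : Int) (results : List (List Int)) : Prop :=
  (∀ r ∈ results, 2 ≤ r.length) ∧ (pvPairs results).Nodup
instance (n : Int) (results : List (List Int)) : Decidable (Pre_solution n results) := by
  unfold Pre_solution; infer_instance

def pvWitness_solution : Int × List (List Int) := (3, [[1, 2], [2, 3]])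

def Spec_solution (n : Int) (results : List (List Int)) (out : Int) : Prop := out = solution_alt n results
instance (n : Int) (results : List (List Int)) (out : Int) : Decidable (Spec_solution n results out) := by unfold Spec_solution; infer_instance

-- ===== CLAIM (what is proved, stated in full; the proofs are below) =====
def Claim_equal_solution : Prop := ∀ (n : Int) (results : List (List Int)), Dom_solution n results → Pre_solution n results → Spec_solution n results (solution n results)

-- ===== LEMMAS AND PROOFS =====

-- the adjacency both programs are about: direct win / loss successors of k in the pair list
def pvDir (side : Bool) (ps : List (Int × Int)) (k : Int) : List Int :=
  if side then (ps.filter (fun p => p.2 == k)).map Prod.fst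
  else (ps.filter (fun p => p.1 == k)).map Prod.snd

-- all players, in A's key-insertion order (= B's players set)
def pvKeysL (ps : List (Int × Int)) : List Int :=
  PySem.Set.ofList (ps.flatMap (fun p => [p.1, p.2]))

-- reachability in ≥ 1 steps along pvDir
def pvR (side : Bool) (ps : List (Int × Int)) : Int → Int → Prop :=
  Relation.TransGen (fun u v => v ∈ pvDir side ps u)

-- the edge relation itself, as used by B
def pvE (ps : List (Int × Int)) (a b : Int) : Prop := (a, b) ∈ ps

-- invariant of A's closure phase on one side: every entry sits between the direct list and
-- reachability, is duplicate-free and stays inside the key set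
def pvGood (side : Bool) (ps : List (Int × Int)) (d : PySem.Dict Int (List Int × List Int)) : Prop :=
  ∀ k, (∀ v ∈ pvDir side ps k, v ∈ pvSel side (d.getD k ([], []))) ∧
    (∀ v ∈ pvSel side (d.getD k ([], [])), pvR side ps k v) ∧
    (pvSel side (d.getD k ([], []))).Nodup ∧
    (∀ v ∈ pvSel side (d.getD k ([], [])), v ∈ pvKeysL ps)

lemma pvMem_keysL {ps : List (Int × Int)} {x : Int} :
    x ∈ pvKeysL ps ↔ ∃ p ∈ ps, p.1 = x ∨ p.2 = x := by
  simp only [pvKeysL, PySem.Set.mem_ofList, List.mem_flatMap, List.mem_cons,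
    List.not_mem_nil, or_false]
  constructor
  · rintro ⟨p, hp, rfl | rfl⟩ <;> exact ⟨p, hp, by simp⟩
  · rintro ⟨p, hp, h | h⟩ <;> exact ⟨p, hp, by simp [h]⟩

lemma pvDir_subset_keysL {side : Bool} {ps : List (Int × Int)} {x v : Int}
    (h : v ∈ pvDir side ps x) : v ∈ pvKeysL ps := by
  cases side <;>
    simp only [pvDir, Bool.false_eq_true, if_false, if_true, List.mem_map, List.mem_filter] at h <;>
    obtain ⟨p, ⟨hp, _⟩, rfl⟩ := h
  · exact pvMem_keysL.2 ⟨p, hp, Or.inr rfl⟩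
  · exact pvMem_keysL.2 ⟨p, hp, Or.inl rfl⟩

lemma pvDir_nil_of_not_mem {side : Bool} {ps : List (Int × Int)} {x : Int}
    (h : x ∉ pvKeysL ps) : pvDir side ps x = [] := by
  cases side <;>
    simp only [pvDir, Bool.false_eq_true, if_false, if_true, List.map_eq_nil_iff,
      List.filter_eq_nil_iff] <;>
    intro p hp hx <;> simp only [beq_iff_eq] at hx <;>
    exact absurd (pvMem_keysL.2 ⟨p, hp, by simp [hx]⟩) h

lemma pvDir_nodup {side ps} (hps : List.Nodup ps) (k : Int) : (pvDir side ps k).Nodup := by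
  cases side <;> simp only [pvDir, Bool.false_eq_true, if_false, if_true]
  · refine (hps.filter _).map_on ?_
    intro p hp q hq h
    simp [List.mem_filter] at hp hq
    exact Prod.ext (by omega) h
  · refine (hps.filter _).map_on ?_
    intro p hp q hq h
    simp [List.mem_filter] at hp hq
    exact Prod.ext h (by omega)

lemma pvDir_false_append (ps : List (Int × Int)) (p : Int × Int) (k : Int) :
    pvDir false (ps ++ [p]) k = pvDir false ps k ++ (if p.1 = k then [p.2] else []) := by
  simp [pvDir, List.filter_append]
  split_ifs with h <;> simp [h]
lemma pvDir_true_append (ps : List (Int × Int)) (p : Int × Int) (k : Int) :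
    pvDir true (ps ++ [p]) k = pvDir true ps k ++ (if p.2 = k then [p.1] else []) := by
  simp [pvDir, List.filter_append]
  split_ifs with h <;> simp [h]

lemma pvKeysL_append (ps : List (Int × Int)) (p : Int × Int) :
    pvKeysL (ps ++ [p]) = PySem.Set.add (PySem.Set.add (pvKeysL ps) p.1) p.2 := by
  simp [pvKeysL, List.flatMap_append, PySem.Set.ofList, List.foldl_append]

lemma pvLen_le {l l' : List Int} (h : l.Nodup) (hs : ∀ x ∈ l, x ∈ l') :
    l.length ≤ l'.length := by
  classical
  calc l.length = l.toFinset.card := (List.toFinset_card_of_nodup h).symm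
    _ ≤ l'.toFinset.card := Finset.card_le_card (fun x hx => by
        simp only [List.mem_toFinset] at hx ⊢; exact hs x hx)
    _ ≤ l'.length := l'.toFinset_card_le

-- ===== build phase (A) =====

lemma pvRowA_spec (d : PySem.Dict Int (List Int × List Int)) (ps : List (Int × Int))
    (r : List Int)
    (hd : ∀ k, d.getD k ([], []) = (pvDir false ps k, pvDir true ps k))
    (hk : d.keys = pvKeysL ps) :
    (∀ k, (pvRowA d r).getD k ([], []) =
      (pvDir false (ps ++ [(PySem.List.pyGetD r 0 0, PySem.List.pyGetD r 1 0)]) k,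
       pvDir true (ps ++ [(PySem.List.pyGetD r 0 0, PySem.List.pyGetD r 1 0)]) k)) ∧
    (pvRowA d r).keys = pvKeysL (ps ++ [(PySem.List.pyGetD r 0 0, PySem.List.pyGetD r 1 0)]) := by
  set a := PySem.List.pyGetD r 0 0 with ha
  set b := PySem.List.pyGetD r 1 0 with hb
  have hcontains : ∀ k, d.contains k = true ↔ k ∈ pvKeysL ps := by
    intro k; rw [PySem.Dict.contains_iff_mem_keys, hk]
  set d1 := if d.contains a then d.modify a ([], []) (pvUpd false (fun l => l ++ [b]))
            else d.insert a ([b], []) with hd1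
  have F1 : ∀ k, d1.getD k ([], []) =
      (pvDir false (ps ++ [(a, b)]) k, pvDir true ps k) := by
    intro k
    rw [hd1]
    by_cases hma : a ∈ pvKeysL ps
    · rw [if_pos ((hcontains a).2 hma), PySem.Dict.getD_modify]
      rw [pvDir_false_append]
      by_cases hka : k = a
      · subst hka; simp [hd, pvUpd]
      · simp [hka, hd k, Ne.symm hka]
    · rw [if_neg (by simp [hcontains a, hma]), PySem.Dict.getD_insert]
      rw [pvDir_false_append]
      by_cases hka : k = a
      · subst hka
        simp [pvDir_nil_of_not_mem (side := false) hma, pvDir_nil_of_not_mem (side := true) hma]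
      · simp [hka, hd k, Ne.symm hka]
  have K1 : d1.keys = PySem.Set.add (pvKeysL ps) a := by
    rw [hd1]
    by_cases hma : a ∈ pvKeysL ps
    · rw [if_pos ((hcontains a).2 hma), PySem.Dict.keys_modify,
        PySem.Dict.keys_insert_of_contains _ _ ((hcontains a).2 hma), hk,
        PySem.Set.add_of_mem hma]
    · rw [if_neg (by simp [hcontains a, hma]),
        PySem.Dict.keys_insert_of_not_contains _ _ (by rw [← Bool.not_eq_true]; simp [hcontains a, hma]), hk,
        PySem.Set.add_of_not_mem hma]
  have hc1 : ∀ k, d1.contains k = true ↔ k ∈ PySem.Set.add (pvKeysL ps) a := by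
    intro k; rw [PySem.Dict.contains_iff_mem_keys, K1]
  have hrow : pvRowA d r =
      (if d1.contains b then d1.modify b ([], []) (pvUpd true (fun l => l ++ [a]))
       else d1.insert b ([], [a])) := by
    rw [pvRowA]
  constructor
  · intro k
    rw [hrow]
    by_cases hmb : b ∈ PySem.Set.add (pvKeysL ps) a
    · rw [if_pos ((hc1 b).2 hmb), PySem.Dict.getD_modify]
      rw [pvDir_true_append]
      by_cases hkb : k = b
      · subst hkb; simp [F1, pvUpd]
      · simp [hkb, F1 k, Ne.symm hkb]
    · have hba : b ≠ a := by
        intro h; exact hmb (by rw [h]; exact (PySem.Set.mem_add _ _ _).2 (Or.inr rfl))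
      have hbK : b ∉ pvKeysL ps := fun h => hmb ((PySem.Set.mem_add _ _ _).2 (Or.inl h))
      rw [if_neg (by simp [hc1 b, hmb]), PySem.Dict.getD_insert]
      rw [pvDir_true_append]
      by_cases hkb : k = b
      · subst hkb
        have : pvDir false (ps ++ [(a, b)]) b = [] := by
          rw [pvDir_false_append, pvDir_nil_of_not_mem (side := false) hbK]
          simp [Ne.symm hba]
        simp [this, pvDir_nil_of_not_mem (side := true) hbK]
      · simp [hkb, F1 k, Ne.symm hkb]
  · rw [hrow, pvKeysL_append]
    by_cases hmb : b ∈ PySem.Set.add (pvKeysL ps) a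
    · rw [if_pos ((hc1 b).2 hmb), PySem.Dict.keys_modify,
        PySem.Dict.keys_insert_of_contains _ _ ((hc1 b).2 hmb), K1]
      rw [PySem.Set.add_of_mem hmb]
    · rw [if_neg (by simp [hc1 b, hmb]),
        PySem.Dict.keys_insert_of_not_contains _ _ (by rw [← Bool.not_eq_true]; simp [hc1 b, hmb]), K1,
        PySem.Set.add_of_not_mem hmb]

lemma pvBuildA_spec (results : List (List Int)) :
    (∀ k, (pvBuildA results).getD k ([], []) =
      (pvDir false (pvPairs results) k, pvDir true (pvPairs results) k)) ∧
    (pvBuildA results).keys = pvKeysL (pvPairs results) := by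
  induction results using List.reverseRecOn with
  | nil =>
      refine ⟨fun k => ?_, ?_⟩
      · simp [pvBuildA, pvPairs, pvDir, PySem.Dict.getD_empty]
      · simp [pvBuildA, pvPairs, pvKeysL, PySem.Set.ofList, PySem.Dict.keys_empty]
  | append_singleton rs r ih =>
      have hps : pvPairs (rs ++ [r]) =
          pvPairs rs ++ [(PySem.List.pyGetD r 0 0, PySem.List.pyGetD r 1 0)] := by
        simp [pvPairs]
      have hfold : pvBuildA (rs ++ [r]) = pvRowA (pvBuildA rs) r := by
        simp [pvBuildA, List.foldl_append]
      rw [hfold, hps]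
      exact pvRowA_spec _ _ _ ih.1 ih.2

-- ===== A's closure phase =====

lemma pvSel_false (p : List Int × List Int) : pvSel false p = p.1 := rfl
lemma pvSel_true (p : List Int × List Int) : pvSel true p = p.2 := rfl

lemma pvSel_upd_same (side : Bool) (f : List Int → List Int) (p : List Int × List Int) :
    pvSel side (pvUpd side f p) = f (pvSel side p) := by
  cases side <;> simp [pvSel, pvUpd]

lemma pvSel_upd_other (side : Bool) (f : List Int → List Int) (p : List Int × List Int) :
    pvSel (!side) (pvUpd side f p) = pvSel (!side) p := by
  cases side <;> simp [pvSel, pvUpd]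

lemma pvInnerA_spec (side : Bool) (ps : List (Int × Int)) (key : Int) :
    ∀ (nums : List Int) (d : PySem.Dict Int (List Int × List Int)) (q : List Int),
    pvGood side ps d → key ∈ d.keys →
    (∀ v ∈ nums, pvR side ps key v) →
    (∀ v ∈ nums, v ∈ pvKeysL ps) →
    (pvGood side ps (pvInnerA side key (d, q) nums).1) ∧
    (∀ k, k ≠ key → (pvInnerA side key (d, q) nums).1.getD k ([], []) = d.getD k ([], [])) ∧
    (pvInnerA side key (d, q) nums).1.keys = d.keys ∧
    (∀ k, pvSel (!side) ((pvInnerA side key (d, q) nums).1.getD k ([], [])) =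
      pvSel (!side) (d.getD k ([], []))) ∧
    (∀ v ∈ pvSel side (d.getD key ([], [])),
      v ∈ pvSel side ((pvInnerA side key (d, q) nums).1.getD key ([], []))) ∧
    (∀ v ∈ nums, v ∈ pvSel side ((pvInnerA side key (d, q) nums).1.getD key ([], []))) ∧
    (∀ x ∈ pvSel side ((pvInnerA side key (d, q) nums).1.getD key ([], [])),
      x ∈ pvSel side (d.getD key ([], [])) ∨ x ∈ (pvInnerA side key (d, q) nums).2) ∧
    (∀ x ∈ (pvInnerA side key (d, q) nums).2,
      x ∈ q ∨ x ∈ pvSel side ((pvInnerA side key (d, q) nums).1.getD key ([], []))) ∧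
    (∀ x ∈ q, x ∈ (pvInnerA side key (d, q) nums).2) ∧
    ((pvInnerA side key (d, q) nums).2.length + (pvSel side (d.getD key ([], []))).length =
      q.length + (pvSel side ((pvInnerA side key (d, q) nums).1.getD key ([], []))).length) := by
  intro nums
  induction nums with
  | nil =>
      intro d q hG hkey hR hK
      exact ⟨hG, fun k _ => rfl, rfl, fun k => rfl, fun v hv => hv, fun v hv => absurd hv (by simp),
        fun x hx => Or.inl hx, fun x hx => Or.inl hx, fun x hx => hx, rfl⟩
  | cons num rest ih =>
      intro d q hG hkey hR hK
      have hstep : ∀ st : PySem.Dict Int (List Int × List Int) × List Int,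
          pvInnerA side key st (num :: rest) =
          pvInnerA side key (if (pvSel side (st.1.getD key ([], []))).contains num
            then st
            else (st.1.modify key ([], []) (pvUpd side (fun l => l ++ [num])), num :: st.2)) rest := by
        intro st; simp only [pvInnerA, List.foldl_cons]
      by_cases hmem : num ∈ pvSel side (d.getD key ([], []))
      · rw [hstep, if_pos (by simpa using hmem)]
        obtain ⟨c1, c2, c3, c4, c5, c6, c7, c8, c9, c10⟩ :=
          ih d q hG hkey (fun v hv => hR v (List.mem_cons_of_mem _ hv))
            (fun v hv => hK v (List.mem_cons_of_mem _ hv))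
        refine ⟨c1, c2, c3, c4, c5, fun v hv => ?_, c7, c8, c9, c10⟩
        rcases List.mem_cons.1 hv with rfl | hv
        · exact c5 _ hmem
        · exact c6 v hv
      · rw [hstep, if_neg (by simpa using hmem)]
        set L := pvSel side (d.getD key ([], [])) with hL
        set d1 := d.modify key ([], []) (pvUpd side (fun l => l ++ [num])) with hd1
        have hd1key : d1.getD key ([], []) = pvUpd side (fun l => l ++ [num]) (d.getD key ([], [])) := by
          rw [hd1, PySem.Dict.getD_modify, if_pos rfl]
        have hd1ne : ∀ k, k ≠ key → d1.getD k ([], []) = d.getD k ([], []) := by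
          intro k hk; rw [hd1, PySem.Dict.getD_modify, if_neg hk]
        have hL1 : pvSel side (d1.getD key ([], [])) = L ++ [num] := by
          rw [hd1key, pvSel_upd_same]
        have hB1 : ∀ k, pvSel (!side) (d1.getD k ([], [])) = pvSel (!side) (d.getD k ([], [])) := by
          intro k
          by_cases hk : k = key
          · subst hk; rw [hd1key, pvSel_upd_other]
          · rw [hd1ne k hk]
        have hkeys1 : d1.keys = d.keys := by
          rw [hd1, PySem.Dict.keys_modify,
            PySem.Dict.keys_insert_of_contains _ _ ((PySem.Dict.contains_iff_mem_keys _ _).2 hkey)]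
        have hG1 : pvGood side ps d1 := by
          intro k
          by_cases hk : k = key
          · rw [hk, hL1]
            obtain ⟨g1, g2, g3, g4⟩ := hG key
            refine ⟨fun v hv => List.mem_append_left _ (g1 v hv), fun v hv => ?_, ?_, fun v hv => ?_⟩
            · rcases List.mem_append.1 hv with hv | hv
              · exact g2 v hv
              · rw [List.mem_singleton] at hv; subst hv; exact hR _ (by simp)
            · exact List.Nodup.append g3 (List.nodup_singleton _)
                (by intro x hx hx'; rw [List.mem_singleton] at hx'; subst hx'; exact hmem hx)
            · rcases List.mem_append.1 hv with hv | hv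
              · exact g4 v hv
              · rw [List.mem_singleton] at hv; subst hv; exact hK _ (by simp)
          · rw [hd1ne k hk]; exact hG k
        obtain ⟨c1, c2, c3, c4, c5, c6, c7, c8, c9, c10⟩ :=
          ih d1 (num :: q) hG1 (by rw [hkeys1]; exact hkey)
            (fun v hv => hR v (List.mem_cons_of_mem _ hv))
            (fun v hv => hK v (List.mem_cons_of_mem _ hv))
        refine ⟨c1, ?_, ?_, ?_, ?_, ?_, ?_, ?_, ?_, ?_⟩
        · intro k hk; rw [c2 k hk, hd1ne k hk]
        · rw [c3, hkeys1]
        · intro k; rw [c4 k, hB1 k]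
        · intro v hv; exact c5 _ (by rw [hL1]; exact List.mem_append_left _ hv)
        · intro v hv
          rcases List.mem_cons.1 hv with rfl | hv
          · exact c5 _ (by rw [hL1]; exact List.mem_append_right _ (List.mem_singleton_self _))
          · exact c6 v hv
        · intro x hx
          rcases c7 x hx with hx' | hx'
          · rw [hL1] at hx'
            rcases List.mem_append.1 hx' with hx'' | hx''
            · exact Or.inl hx''
            · rw [List.mem_singleton] at hx''; subst hx''
              exact Or.inr (c9 _ (by simp))
          · exact Or.inr hx'
        · intro x hx
          rcases c8 x hx with hx' | hx'
          · rcases List.mem_cons.1 hx' with rfl | hx''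
            · exact Or.inr (c5 _ (by rw [hL1]; exact List.mem_append_right _ (List.mem_singleton_self _)))
            · exact Or.inl hx''
          · exact Or.inr hx'
        · intro x hx; exact c9 _ (List.mem_cons_of_mem _ hx)
        · have := c10
          rw [hL1] at this
          simp only [List.length_append, List.length_cons, List.length_nil] at this ⊢
          omega

lemma pvWhileA_spec (side : Bool) (ps : List (Int × Int)) (key : Int) :
    ∀ (fuel : Nat) (d : PySem.Dict Int (List Int × List Int)) (q : List Int),
    pvGood side ps d → key ∈ d.keys →
    (∀ x ∈ q, x ∈ pvSel side (d.getD key ([], []))) →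
    (∀ x ∈ pvSel side (d.getD key ([], [])),
      x ∈ q ∨ ∀ v ∈ pvDir side ps x, v ∈ pvSel side (d.getD key ([], []))) →
    q.length + ((pvKeysL ps).length - (pvSel side (d.getD key ([], []))).length) ≤ fuel →
    (pvGood side ps (pvWhileA side key fuel d q)) ∧
    (∀ k, k ≠ key → (pvWhileA side key fuel d q).getD k ([], []) = d.getD k ([], [])) ∧
    (pvWhileA side key fuel d q).keys = d.keys ∧
    (∀ k, pvSel (!side) ((pvWhileA side key fuel d q).getD k ([], [])) =
      pvSel (!side) (d.getD k ([], []))) ∧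
    (∀ v ∈ pvSel side (d.getD key ([], [])),
      v ∈ pvSel side ((pvWhileA side key fuel d q).getD key ([], []))) ∧
    (∀ x ∈ pvSel side ((pvWhileA side key fuel d q).getD key ([], [])),
      ∀ v ∈ pvDir side ps x, v ∈ pvSel side ((pvWhileA side key fuel d q).getD key ([], []))) := by
  intro fuel
  induction fuel with
  | zero =>
      intro d q hG hkey hq hpend hfuel
      have hq0 : q = [] := by
        cases q with
        | nil => rfl
        | cons a as => exfalso; simp [List.length_cons] at hfuel
      subst hq0
      refine ⟨hG, fun k _ => rfl, rfl, fun k => rfl, fun v hv => hv, ?_⟩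
      intro x hx v hv
      rcases hpend x hx with h | h
      · cases h
      · exact h v hv
  | succ fuel ih =>
      intro d q hG hkey hq hpend hfuel
      cases q with
      | nil =>
          refine ⟨hG, fun k _ => rfl, rfl, fun k => rfl, fun v hv => hv, ?_⟩
          intro x hx v hv
          rcases hpend x hx with h | h
          · cases h
          · exact h v hv
      | cons search rest =>
          have hrw : pvWhileA side key (fuel + 1) d (search :: rest) =
              pvWhileA side key fuel
                (pvInnerA side key (d, rest) (pvSel side (d.getD search ([], [])))).1
                (pvInnerA side key (d, rest) (pvSel side (d.getD search ([], [])))).2 := rfl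
          rw [hrw]
          have hsearchL : search ∈ pvSel side (d.getD key ([], [])) := hq search (by simp)
          have hRsearch : pvR side ps key search := (hG key).2.1 search hsearchL
          obtain ⟨c1, c2, c3, c4, c5, c6, c7, c8, c9, c10⟩ :=
            pvInnerA_spec side ps key (pvSel side (d.getD search ([], []))) d rest hG hkey
              (fun v hv => Relation.TransGen.trans hRsearch ((hG search).2.1 v hv))
              ((hG search).2.2.2)
          have hq2 : ∀ x ∈ (pvInnerA side key (d, rest) (pvSel side (d.getD search ([], [])))).2,
              x ∈ pvSel side ((pvInnerA side key (d, rest)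
                (pvSel side (d.getD search ([], [])))).1.getD key ([], [])) := by
            intro x hx
            rcases c8 x hx with h | h
            · exact c5 _ (hq x (List.mem_cons_of_mem _ h))
            · exact h
          have hpend2 : ∀ x ∈ pvSel side ((pvInnerA side key (d, rest)
                (pvSel side (d.getD search ([], [])))).1.getD key ([], [])),
              x ∈ (pvInnerA side key (d, rest) (pvSel side (d.getD search ([], [])))).2 ∨
              ∀ v ∈ pvDir side ps x, v ∈ pvSel side ((pvInnerA side key (d, rest)
                (pvSel side (d.getD search ([], [])))).1.getD key ([], [])) := by
            intro x hx
            rcases c7 x hx with hxL | hxq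
            · rcases hpend x hxL with hxq' | hcl
              · rcases List.mem_cons.1 hxq' with rfl | hxrest
                · exact Or.inr (fun v hv => c6 v ((hG x).1 v hv))
                · exact Or.inl (c9 x hxrest)
              · exact Or.inr (fun v hv => c5 v (hcl v hv))
            · exact Or.inl hxq
          have hLbound : (pvSel side (d.getD key ([], []))).length ≤ (pvKeysL ps).length :=
            pvLen_le (hG key).2.2.1 (hG key).2.2.2
          have hL2bound : (pvSel side ((pvInnerA side key (d, rest)
                (pvSel side (d.getD search ([], [])))).1.getD key ([], []))).length ≤
              (pvKeysL ps).length :=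
            pvLen_le (c1 key).2.2.1 (c1 key).2.2.2
          have hfuel2 : (pvInnerA side key (d, rest) (pvSel side (d.getD search ([], [])))).2.length +
              ((pvKeysL ps).length - (pvSel side ((pvInnerA side key (d, rest)
                (pvSel side (d.getD search ([], [])))).1.getD key ([], []))).length) ≤ fuel := by
            simp only [List.length_cons] at hfuel
            omega
          obtain ⟨w1, w2, w3, w4, w5, w6⟩ :=
            ih (pvInnerA side key (d, rest) (pvSel side (d.getD search ([], [])))).1
              (pvInnerA side key (d, rest) (pvSel side (d.getD search ([], [])))).2
              c1 (by rw [c3]; exact hkey) hq2 hpend2 hfuel2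
          exact ⟨w1, fun k hk => (w2 k hk).trans (c2 k hk), w3.trans c3,
            fun k => (w4 k).trans (c4 k), fun v hv => w5 _ (c5 v hv), w6⟩

-- after a finished worklist the entry at key is exactly reachability
lemma pvClosed_iff {side ps key} {L : List Int}
    (hadj : ∀ v ∈ pvDir side ps key, v ∈ L)
    (hsound : ∀ v ∈ L, pvR side ps key v)
    (hclosed : ∀ x ∈ L, ∀ v ∈ pvDir side ps x, v ∈ L) :
    ∀ v, v ∈ L ↔ pvR side ps key v := by
  intro v
  refine ⟨hsound v, fun h => ?_⟩
  induction h with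
  | single h => exact hadj _ h
  | tail _ hstep ih => exact hclosed _ ih _ hstep

-- the loop body of pvCloseA, named for the proofs
def pvBodyA (side : Bool) (dic : PySem.Dict Int (List Int × List Int)) (key : Int) :
    PySem.Dict Int (List Int × List Int) :=
  let q := (pvSel side (dic.getD key ([], []))).reverse
  pvWhileA side key (dic.size + q.length + 1) dic q

lemma pvCloseAux (side : Bool) (ps : List (Int × Int)) :
    ∀ (ks : List Int) (d : PySem.Dict Int (List Int × List Int)),
    pvGood side ps d → d.keys = pvKeysL ps → ks.Nodup → (∀ k ∈ ks, k ∈ pvKeysL ps) →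
    pvGood side ps (ks.foldl (pvBodyA side) d) ∧
    (ks.foldl (pvBodyA side) d).keys = d.keys ∧
    (∀ k, pvSel (!side) ((ks.foldl (pvBodyA side) d).getD k ([], [])) =
      pvSel (!side) (d.getD k ([], []))) ∧
    (∀ k, k ∉ ks → (ks.foldl (pvBodyA side) d).getD k ([], []) = d.getD k ([], [])) ∧
    (∀ k ∈ ks, ∀ v,
      v ∈ pvSel side ((ks.foldl (pvBodyA side) d).getD k ([], [])) ↔ pvR side ps k v) := by
  intro ks
  induction ks with
  | nil =>
      intro d hG hkeys _ _
      exact ⟨hG, rfl, fun k => rfl, fun k _ => rfl, fun k hk => absurd hk (by simp)⟩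
  | cons key ks' ih =>
      intro d hG hkeys hnd hmem
      have hkeyd : key ∈ d.keys := by rw [hkeys]; exact hmem key (by simp)
      have hsize : d.size = (pvKeysL ps).length := by
        have h1 : d.size = d.keys.length := by
          simp [PySem.Dict.size, PySem.Dict.keys]
        rw [h1, hkeys]
      obtain ⟨w1, w2, w3, w4, w5, w6⟩ :=
        pvWhileA_spec side ps key
          (d.size + (pvSel side (d.getD key ([], []))).reverse.length + 1) d
          ((pvSel side (d.getD key ([], []))).reverse) hG hkeyd
          (fun x hx => List.mem_reverse.1 hx)
          (fun x hx => Or.inl (List.mem_reverse.2 hx))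
          (by
            have hLb : (pvSel side (d.getD key ([], []))).length ≤ (pvKeysL ps).length :=
              pvLen_le (hG key).2.2.1 (hG key).2.2.2
            simp only [List.length_reverse, hsize]
            omega)
      have hfold : (key :: ks').foldl (pvBodyA side) d = ks'.foldl (pvBodyA side) (pvBodyA side d key) :=
        List.foldl_cons ..
      have hbody : pvBodyA side d key =
          pvWhileA side key
            (d.size + (pvSel side (d.getD key ([], []))).reverse.length + 1) d
            ((pvSel side (d.getD key ([], []))).reverse) := rfl
      rw [hfold]
      have hG1 := hbody ▸ w1
      have hiff : ∀ v, v ∈ pvSel side ((pvBodyA side d key).getD key ([], [])) ↔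
          pvR side ps key v := by
        rw [hbody]
        exact pvClosed_iff (w1 key).1 (w1 key).2.1 w6
      obtain ⟨z1, z2, z3, z4, z5⟩ :=
        ih (pvBodyA side d key) hG1
          (by rw [hbody, w3, hkeys])
          (List.Nodup.of_cons hnd)
          (fun k hk => hmem k (List.mem_cons_of_mem _ hk))
      have hkeynot : key ∉ ks' := (List.nodup_cons.1 hnd).1
      refine ⟨z1, by rw [z2, hbody, w3], ?_, ?_, ?_⟩
      · intro k
        rw [z3 k, hbody, w4 k]
      · intro k hk
        have hkne : k ≠ key := fun h => hk (h ▸ List.mem_cons_self ..)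
        have hknot : k ∉ ks' := fun h => hk (List.mem_cons_of_mem _ h)
        rw [z4 k hknot, hbody, w2 k hkne]
      · intro k hk v
        rcases List.mem_cons.1 hk with rfl | hk'
        · rw [z4 k hkeynot]
          exact hiff v
        · exact z5 k hk' v

lemma pvCloseA_spec (side : Bool) (ps : List (Int × Int)) :
    ∀ (d : PySem.Dict Int (List Int × List Int)),
    pvGood side ps d → d.keys = pvKeysL ps →
    pvGood side ps (pvCloseA side d) ∧
    (pvCloseA side d).keys = d.keys ∧
    (∀ k, pvSel (!side) ((pvCloseA side d).getD k ([], [])) = pvSel (!side) (d.getD k ([], []))) ∧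
    (∀ k ∈ pvKeysL ps, ∀ v,
      v ∈ pvSel side ((pvCloseA side d).getD k ([], [])) ↔ pvR side ps k v) := by
  intro d hG hkeys
  have hrw : pvCloseA side d = d.keys.foldl (pvBodyA side) d := rfl
  obtain ⟨z1, z2, z3, z4, z5⟩ :=
    pvCloseAux side ps d.keys d hG hkeys (hkeys ▸ PySem.Set.nodup_ofList _)
      (fun k hk => hkeys ▸ hk)
  rw [hrw]
  exact ⟨z1, z2, z3, fun k hk v => z5 k (by rw [hkeys]; exact hk) v⟩

-- ===== B's closure: edge relation and join fixpoint =====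

lemma pvDir_false_mem {ps : List (Int × Int)} {k v : Int} :
    v ∈ pvDir false ps k ↔ (k, v) ∈ ps := by
  simp only [pvDir, Bool.false_eq_true, if_false, List.mem_map, List.mem_filter, beq_iff_eq]
  constructor
  · rintro ⟨p, ⟨hp, rfl⟩, rfl⟩; exact hp
  · intro h; exact ⟨(k, v), ⟨h, rfl⟩, rfl⟩

lemma pvDir_true_mem {ps : List (Int × Int)} {k v : Int} :
    v ∈ pvDir true ps k ↔ (v, k) ∈ ps := by
  simp only [pvDir, if_true, List.mem_map, List.mem_filter, beq_iff_eq]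
  constructor
  · rintro ⟨p, ⟨hp, rfl⟩, rfl⟩; exact hp
  · intro h; exact ⟨(v, k), ⟨h, rfl⟩, rfl⟩

lemma pvR_false_iff {ps : List (Int × Int)} {a b : Int} :
    pvR false ps a b ↔ Relation.TransGen (pvE ps) a b := by
  constructor
  · exact Relation.TransGen.mono (fun u v hv => pvDir_false_mem.1 hv)
  · exact Relation.TransGen.mono (fun u v hv => pvDir_false_mem.2 hv)

lemma pvR_true_iff {ps : List (Int × Int)} {a b : Int} :
    pvR true ps a b ↔ Relation.TransGen (pvE ps) b a := by
  rw [← Relation.transGen_swap]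
  constructor
  · exact Relation.TransGen.mono (fun u v hv => pvDir_true_mem.1 hv)
  · exact Relation.TransGen.mono (fun u v hv => pvDir_true_mem.2 hv)

lemma pvJoin_mem {ps c : List (Int × Int)} {x : Int × Int} :
    x ∈ c.flatMap (fun p => (ps.filter (fun q => q.1 == p.2)).map (fun q => (p.1, q.2))) ↔
    ∃ b, (x.1, b) ∈ c ∧ (b, x.2) ∈ ps := by
  simp only [List.mem_flatMap, List.mem_map, List.mem_filter, beq_iff_eq]
  constructor
  · rintro ⟨p, hp, q, ⟨hq, hq1⟩, rfl⟩
    exact ⟨p.2, by simpa using hp, by rw [← hq1]; simpa using hq⟩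
  · rintro ⟨b, h1, h2⟩
    exact ⟨(x.1, b), h1, (b, x.2), ⟨h2, rfl⟩, rfl⟩

lemma pvPairLen_le {l : List (Int × Int)} {K : List Int} (hnd : l.Nodup)
    (h : ∀ p ∈ l, p.1 ∈ K ∧ p.2 ∈ K) : l.length ≤ K.length * K.length := by
  classical
  calc l.length = l.toFinset.card := (List.toFinset_card_of_nodup hnd).symm
    _ ≤ (K.toFinset ×ˢ K.toFinset).card := Finset.card_le_card (fun p hp => by
        simp only [List.mem_toFinset] at hp
        simp only [Finset.mem_product, List.mem_toFinset]
        exact h p hp)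
    _ = K.toFinset.card * K.toFinset.card := Finset.card_product _ _
    _ ≤ K.length * K.length := Nat.mul_le_mul K.toFinset_card_le K.toFinset_card_le

lemma pvCloseLoopB_spec (ps : List (Int × Int)) :
    ∀ (fuel : Nat) (c : PySem.Set (Int × Int)),
    c.Nodup → (∀ p ∈ ps, p ∈ c) →
    (∀ p ∈ c, Relation.TransGen (pvE ps) p.1 p.2) →
    (∀ p ∈ c, p.1 ∈ pvKeysL ps ∧ p.2 ∈ pvKeysL ps) →
    (pvKeysL ps).length * (pvKeysL ps).length + 1 ≤ fuel + c.length →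
    (pvCloseLoopB ps fuel c).Nodup ∧
    (∀ a b, (a, b) ∈ pvCloseLoopB ps fuel c ↔ Relation.TransGen (pvE ps) a b) := by
  intro fuel
  induction fuel with
  | zero =>
      intro c hnd hps hsound hK hfuel
      exfalso
      have := pvPairLen_le hnd hK
      omega
  | succ fuel ih =>
      intro c hnd hps hsound hK hfuel
      have hrw : pvCloseLoopB ps (fuel + 1) c =
          (if (pvNewB ps c).isEmpty then c
           else pvCloseLoopB ps fuel (PySem.Set.union c (pvNewB ps c))) := rfl
      rw [hrw]
      by_cases hfix : (pvNewB ps c).isEmpty = true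
      · rw [if_pos hfix]
        have hempty : pvNewB ps c = [] := List.isEmpty_iff.1 hfix
        have hclosed : ∀ a b d, (a, b) ∈ c → (b, d) ∈ ps → (a, d) ∈ c := by
          intro a b d hc hp
          by_contra hnot
          have hmem : (a, d) ∈ pvNewB ps c := by
            rw [pvNewB, PySem.Set.mem_diff, PySem.Set.mem_ofList]
            exact ⟨pvJoin_mem.2 ⟨b, hc, hp⟩, hnot⟩
          rw [hempty] at hmem
          exact absurd hmem (List.not_mem_nil)
        refine ⟨hnd, fun a b => ⟨fun h => hsound (a, b) h, fun h => ?_⟩⟩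
        induction h with
        | single h' => exact hps _ h'
        | tail hab hbd ih' => exact hclosed _ _ _ ih' hbd
      · rw [if_neg hfix]
        have hnwnd : (pvNewB ps c).Nodup := by
          rw [pvNewB]; exact PySem.Set.nodup_diff _ _ (PySem.Set.nodup_ofList _)
        have hdisj : ∀ x ∈ pvNewB ps c, x ∉ c := by
          intro x hx
          rw [pvNewB, PySem.Set.mem_diff] at hx
          exact hx.2
        have hU : PySem.Set.union c (pvNewB ps c) = c ++ pvNewB ps c := by
          rw [PySem.Set.union_eq_update]
          exact PySem.Set.update_eq_append_of_disjoint _ _ hnwnd hdisj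
        have hnwmem : ∀ x ∈ pvNewB ps c, ∃ b, (x.1, b) ∈ c ∧ (b, x.2) ∈ ps := by
          intro x hx
          rw [pvNewB, PySem.Set.mem_diff, PySem.Set.mem_ofList] at hx
          exact pvJoin_mem.1 hx.1
        have hlen : 1 ≤ (pvNewB ps c).length := by
          cases h : pvNewB ps c with
          | nil => rw [h] at hfix; simp at hfix
          | cons _ _ => simp
        rw [hU]
        refine ih (c ++ pvNewB ps c)
          (List.Nodup.append hnd hnwnd (fun a ha ha' => hdisj a ha' ha)) ?_ ?_ ?_ ?_
        · intro p hp; exact List.mem_append_left _ (hps p hp)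
        · intro p hp
          rcases List.mem_append.1 hp with h | h
          · exact hsound p h
          · obtain ⟨b, h1, h2⟩ := hnwmem p h
            exact Relation.TransGen.tail (hsound (p.1, b) h1) h2
        · intro p hp
          rcases List.mem_append.1 hp with h | h
          · exact hK p h
          · obtain ⟨b, h1, h2⟩ := hnwmem p h
            exact ⟨(hK _ h1).1, pvMem_keysL.2 ⟨(b, p.2), h2, Or.inr rfl⟩⟩
        · simp only [List.length_append]
          omega

lemma pvKeysL_len_le (ps : List (Int × Int)) : (pvKeysL ps).length ≤ 2 * ps.length := by
  refine le_trans (PySem.Set.length_ofList_le _) ?_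
  induction ps with
  | nil => simp
  | cons p ps ih =>
      simp only [List.flatMap_cons, List.length_append, List.length_cons, List.length_nil] at *
      omega

-- counting: |{e ∈ C : e.1 = k}| = |W| when C is a nodup pair set whose k-rows are exactly W
lemma pvCountFst {C : List (Int × Int)} {W : List Int} {k : Int}
    (hC : C.Nodup) (hW : W.Nodup) (hmem : ∀ v, (k, v) ∈ C ↔ v ∈ W) :
    (C.filter (fun e => e.1 == k)).length = W.length := by
  have hnd : ((C.filter (fun e => e.1 == k)).map Prod.snd).Nodup := by
    refine (hC.filter _).map_on ?_
    intro p hp q hq h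
    simp only [List.mem_filter, beq_iff_eq] at hp hq
    exact Prod.ext (hp.2.trans hq.2.symm) h
  have hperm : ((C.filter (fun e => e.1 == k)).map Prod.snd).Perm W := by
    refine (List.perm_ext_iff_of_nodup hnd hW).2 (fun v => ?_)
    simp only [List.mem_map, List.mem_filter, beq_iff_eq]
    constructor
    · rintro ⟨p, ⟨hp, hp1⟩, rfl⟩
      exact (hmem p.2).1 (by rw [← hp1]; simpa using hp)
    · intro hv
      exact ⟨(k, v), ⟨(hmem v).2 hv, rfl⟩, rfl⟩
  calc (C.filter (fun e => e.1 == k)).length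
      = ((C.filter (fun e => e.1 == k)).map Prod.snd).length := (List.length_map ..).symm
    _ = W.length := hperm.length_eq

lemma pvCountSnd {C : List (Int × Int)} {L : List Int} {k : Int}
    (hC : C.Nodup) (hL : L.Nodup) (hmem : ∀ v, (v, k) ∈ C ↔ v ∈ L) :
    (C.filter (fun e => e.2 == k)).length = L.length := by
  have hnd : ((C.filter (fun e => e.2 == k)).map Prod.fst).Nodup := by
    refine (hC.filter _).map_on ?_
    intro p hp q hq h
    simp only [List.mem_filter, beq_iff_eq] at hp hq
    exact Prod.ext h (hp.2.trans hq.2.symm)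
  have hperm : ((C.filter (fun e => e.2 == k)).map Prod.fst).Perm L := by
    refine (List.perm_ext_iff_of_nodup hnd hL).2 (fun v => ?_)
    simp only [List.mem_map, List.mem_filter, beq_iff_eq]
    constructor
    · rintro ⟨p, ⟨hp, hp2⟩, rfl⟩
      exact (hmem p.1).1 (by rw [← hp2]; simpa using hp)
    · intro hv
      exact ⟨(v, k), ⟨(hmem v).2 hv, rfl⟩, rfl⟩
  calc (C.filter (fun e => e.2 == k)).length
      = ((C.filter (fun e => e.2 == k)).map Prod.fst).length := (List.length_map ..).symm
    _ = L.length := hperm.length_eq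

-- ===== VERDICT (by name: the statement is the Claim_ definition above) =====
theorem solution_spec : Claim_equal_solution := by
  intro n results hdom hpre
  obtain ⟨-, hps⟩ := hpre
  unfold Spec_solution
  -- A side
  obtain ⟨hAd, hAk⟩ := pvBuildA_spec results
  have hG0 : pvGood false (pvPairs results) (pvBuildA results) := by
    intro k
    simp only [hAd, pvSel_false]
    exact ⟨fun v hv => hv, fun v hv => Relation.TransGen.single hv,
      pvDir_nodup hps k, fun v hv => pvDir_subset_keysL hv⟩
  obtain ⟨hg1, hk1, ho1, hc1⟩ := pvCloseA_spec false (pvPairs results) (pvBuildA results) hG0 hAk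
  have hsel1 : ∀ k, pvSel true ((pvCloseA false (pvBuildA results)).getD k ([], [])) =
      pvDir true (pvPairs results) k := by
    intro k
    have h := ho1 k
    rw [show (!false) = true from rfl] at h
    rw [h]; simp only [hAd, pvSel_true]
  have hG1 : pvGood true (pvPairs results) (pvCloseA false (pvBuildA results)) := by
    intro k
    rw [hsel1 k]
    exact ⟨fun v hv => hv, fun v hv => Relation.TransGen.single hv,
      pvDir_nodup hps k, fun v hv => pvDir_subset_keysL hv⟩
  obtain ⟨hg2, hk2, ho2, hc2⟩ :=
    pvCloseA_spec true (pvPairs results) (pvCloseA false (pvBuildA results)) hG1 (hk1.trans hAk)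
  have hsel2 : ∀ k, pvSel false ((pvCloseA true (pvCloseA false (pvBuildA results))).getD k ([], [])) =
      pvSel false ((pvCloseA false (pvBuildA results)).getD k ([], [])) := by
    intro k
    have h := ho2 k
    rwa [show (!true) = false from rfl] at h
  -- B side
  have hedges : pvEdgesB results = pvPairs results := by
    show PySem.Set.ofList (pvPairs results) = pvPairs results
    exact PySem.Set.ofList_eq_self_of_nodup _ hps
  have hK2 := pvKeysL_len_le (pvPairs results)
  have hmul : 2 * (pvPairs results).length * (2 * (pvPairs results).length) =
      4 * (pvPairs results).length * (pvPairs results).length := by ring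
  obtain ⟨hCnd, hCmem⟩ :=
    pvCloseLoopB_spec (pvPairs results)
      (4 * (pvPairs results).length * (pvPairs results).length + 1) (pvPairs results)
      hps (fun p hp => hp)
      (fun p hp => Relation.TransGen.single (show pvE (pvPairs results) p.1 p.2 by
        simpa [pvE] using hp))
      (fun p hp => ⟨pvMem_keysL.2 ⟨p, hp, Or.inl rfl⟩, pvMem_keysL.2 ⟨p, hp, Or.inr rfl⟩⟩)
      (by
        have := Nat.mul_le_mul hK2 hK2
        omega)
  -- assemble
  show solution n results = solution_alt n results
  simp only [solution, solution_alt, hedges]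
  rw [hk2.trans (hk1.trans hAk)]
  have hplayers : PySem.Set.ofList ((pvPairs results).flatMap (fun e => [e.1, e.2])) =
      pvKeysL (pvPairs results) := rfl
  rw [hplayers]
  apply PySem.List.foldl_congr_mem'
  intro k hk acc
  set C := pvCloseLoopB (pvPairs results)
      (4 * (pvPairs results).length * (pvPairs results).length + 1) (pvPairs results) with hC
  set D := pvCloseA true (pvCloseA false (pvBuildA results)) with hD
  have hWnd : (pvSel false (D.getD k ([], []))).Nodup := by
    rw [hD, hsel2 k]; exact (hg1 k).2.2.1
  have hLnd : (pvSel true (D.getD k ([], []))).Nodup := (hg2 k).2.2.1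
  have hW : (C.filter (fun e => e.1 == k)).length = (pvSel false (D.getD k ([], []))).length := by
    refine pvCountFst hCnd hWnd (fun v => ?_)
    rw [hCmem k v, hD, hsel2 k, hc1 k hk v, pvR_false_iff]
  have hL : (C.filter (fun e => e.2 == k)).length = (pvSel true (D.getD k ([], []))).length := by
    refine pvCountSnd hCnd hLnd (fun v => ?_)
    rw [hCmem v k, hD, hc2 k hk v, pvR_true_iff]
  refine if_congr ?_ rfl rfl
  rw [show ∀ p : List Int × List Int, p.1 = pvSel false p from fun p => rfl,
    show ∀ p : List Int × List Int, p.2 = pvSel true p from fun p => rfl,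
    List.length_append, hW, hL]
  push_cast
  constructor <;> intro h <;> omega
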